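-- pv_equiv track=rewrite | github.com/RationAI/ciao | ciao/algorithm/bitmask_graph.py | iter_bits
-- ===== SOURCE A (Python) =====
-- from collections.abc import Iterator
--
-- def iter_bits(mask: int) -> Iterator[int]:
--     """Iterate over set bits in a mask using low-bit isolation.
--
--     Yields node IDs in arbitrary order (depends on bit positions).
--     Performance: O(k) where k is the number of set bits.
--
--     Example:
--         mask = 0b10110  # bits 1, 2, 4 are set
--         list(iter_bits(mask))  # [1, 2, 4]
--     """
--     if mask < 0:
--         raise ValueError("mask cannot be negative")
--
--     temp = mask
--     while temp:
--         low_bit = temp & -temp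
--         node_id = low_bit.bit_length() - 1
--         yield node_id
--         temp ^= low_bit
-- ===== SOURCE B (Python) =====
-- def iter_bits(mask):
--     """Yield indices of set bits in mask, low to high, by a plain shift-scan."""
--     if mask < 0:
--         raise ValueError("mask cannot be negative")
--
--     pos = 0
--     temp = mask
--     while temp:
--         if temp & 1:
--             yield pos
--         temp >>= 1
--         pos += 1
-- ===== Notes on version B (the rewrite author's own statement) =====
-- stated objective: simpler
-- what changed: B scans bit positions sequentially (test temp & 1, shift right, advance a position counter) instead of A's low-bit isolation with temp & -temp and bit_length arithmetic.
import Mathlib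
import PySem

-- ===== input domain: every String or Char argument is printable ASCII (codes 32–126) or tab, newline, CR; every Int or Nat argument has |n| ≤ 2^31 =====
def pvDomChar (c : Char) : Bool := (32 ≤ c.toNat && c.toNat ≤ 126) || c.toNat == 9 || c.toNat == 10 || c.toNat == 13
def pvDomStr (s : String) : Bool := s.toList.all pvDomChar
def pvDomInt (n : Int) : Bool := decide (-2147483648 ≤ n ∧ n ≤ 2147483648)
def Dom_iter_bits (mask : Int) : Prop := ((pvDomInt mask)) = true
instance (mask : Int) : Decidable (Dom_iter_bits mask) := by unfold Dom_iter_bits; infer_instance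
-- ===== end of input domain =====

-- B replaces A's low-bit isolation (temp & -temp, bit_length) by a plain position-by-position
-- shift scan; objective: simpler. Both are generators in Python; equivalence is about the
-- yielded list of indices.

-- ===== PORT A =====
-- exact port of Python's int.bit_length(): number of bits needed for |n|
def pyBitLength (n : Int) : Int := if n = 0 then 0 else Int.ofNat (Nat.log2 n.natAbs) + 1

-- A's while-loop; fuel only makes the recursion structural (mask.toNat + 1 always suffices,
-- since temp strictly decreases while nonzero)
def iterBitsLoopA : Nat → Int → List Int
  | 0, _ => []
  | fuel+1, temp =>
    if temp = 0 then []                       -- while temp: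
    else
      let lowBit := temp.land (-temp)         --   low_bit = temp & -temp
      let nodeId := pyBitLength lowBit - 1    --   node_id = low_bit.bit_length() - 1
      nodeId :: iterBitsLoopA fuel (temp.xor lowBit)   -- yield node_id; temp ^= low_bit

def iter_bits (mask : Int) : List Int :=
  if mask < 0 then []                         -- Python raises ValueError here (outside Pre_)
  else iterBitsLoopA (mask.toNat + 1) mask

-- ===== PORT B =====
-- B's while-loop: test the low bit, shift right, advance the position counter
def iterBitsLoopB : Nat → Int → Int → List Int
  | 0, _, _ => []
  | fuel+1, temp, pos =>
    if temp = 0 then []                       -- while temp: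
    else
      (if temp.land 1 ≠ 0 then [pos] else []) --   if temp & 1: yield pos
        ++ iterBitsLoopB fuel (temp.shiftRight 1) (pos + 1)  -- temp >>= 1; pos += 1

def iter_bits_alt (mask : Int) : List Int :=
  if mask < 0 then []                         -- Python raises ValueError here (outside Pre_)
  else iterBitsLoopB (mask.toNat + 1) mask 0

-- ===== PRECONDITION & SPEC =====
-- Pre_ excludes negative masks, on which both Pythons raise ValueError
def Pre_iter_bits (mask : Int) : Prop := 0 ≤ mask
instance (mask : Int) : Decidable (Pre_iter_bits mask) := by unfold Pre_iter_bits; infer_instance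
def pvWitness_iter_bits : Int := (22)
def Spec_iter_bits (mask : Int) (out : List Int) : Prop := out = iter_bits_alt mask
instance (mask : Int) (out : List Int) : Decidable (Spec_iter_bits mask out) := by unfold Spec_iter_bits; infer_instance

-- ===== CLAIM (what is proved, stated in full; the proofs are below) =====
def Claim_equal_iter_bits : Prop := ∀ (mask : Int), Dom_iter_bits mask → Pre_iter_bits mask → Spec_iter_bits mask (iter_bits mask)

-- ===== LEMMAS AND PROOFS =====

-- Nat-level bit facts
theorem pvXorLdiff (n : Nat) : n ^^^ Nat.ldiff n (n-1) = n &&& (n-1) := by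
  apply Nat.eq_of_testBit_eq; intro i
  simp only [Nat.testBit_xor, Nat.testBit_ldiff, Nat.testBit_and]
  cases n.testBit i <;> cases (n-1).testBit i <;> rfl

theorem pvAndPredLt (n : Nat) (h : 0 < n) : n &&& (n-1) < n :=
  Nat.lt_of_le_of_lt Nat.and_le_right (by omega)

theorem pvLdiffOdd (u : Nat) : Nat.ldiff (2*u+1) (2*u) = 1 := by
  apply Nat.eq_of_testBit_eq; intro i
  rw [Nat.testBit_ldiff]
  cases i with
  | zero =>
    simp only [Nat.testBit_zero]
    have e1 : (2*u+1) % 2 = 1 := by omega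
    have e2 : (2*u) % 2 = 0 := by omega
    simp [e1, e2]
  | succ i =>
    simp only [Nat.testBit_add_one]
    rw [show (2*u+1)/2 = u from by omega, show (2*u)/2 = u from by omega,
        show (1:Nat)/2 = 0 from by omega, Nat.zero_testBit]
    cases u.testBit i <;> rfl

theorem pvLdiffEven (u : Nat) : Nat.ldiff (2*u) (2*u-1) = 2 * Nat.ldiff u (u-1) := by
  rcases Nat.eq_zero_or_pos u with h | h
  · subst h
    simp [show Nat.ldiff 0 0 = 0 from Nat.eq_of_testBit_eq (fun i => by simp [Nat.testBit_ldiff])]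
  apply Nat.eq_of_testBit_eq; intro i
  rw [Nat.testBit_ldiff]
  cases i with
  | zero =>
    simp only [Nat.testBit_zero]
    have e1 : (2*u) % 2 = 0 := by omega
    have e2 : (2 * Nat.ldiff u (u-1)) % 2 = 0 := by omega
    simp [e1, e2]
  | succ i =>
    simp only [Nat.testBit_add_one]
    rw [show (2*u)/2 = u from by omega, show (2*u-1)/2 = u-1 from by omega,
        show (2 * Nat.ldiff u (u-1))/2 = Nat.ldiff u (u-1) from by omega,
        Nat.testBit_ldiff]

theorem pvLdiffPos (n : Nat) (h : 0 < n) : 0 < Nat.ldiff n (n-1) := by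
  rcases Nat.eq_zero_or_pos (Nat.ldiff n (n-1)) with h0 | h0
  · have h1 := pvXorLdiff n
    rw [h0, Nat.xor_zero] at h1
    have h2 := pvAndPredLt n h
    omega
  · exact h0

theorem pvAndOdd (u : Nat) : (2*u+1) &&& (2*u) = 2*u := by
  apply Nat.eq_of_testBit_eq; intro i
  rw [Nat.testBit_and]
  cases i with
  | zero =>
    simp only [Nat.testBit_zero]
    have e1 : (2*u+1) % 2 = 1 := by omega
    have e2 : (2*u) % 2 = 0 := by omega
    simp [e1, e2]
  | succ i =>
    simp only [Nat.testBit_add_one]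
    rw [show (2*u+1)/2 = u from by omega, show (2*u)/2 = u from by omega, Bool.and_self]

theorem pvAndEven (u : Nat) : (2*u) &&& (2*u-1) = 2 * (u &&& (u-1)) := by
  rcases Nat.eq_zero_or_pos u with h | h
  · subst h; simp
  apply Nat.eq_of_testBit_eq; intro i
  rw [Nat.testBit_and]
  cases i with
  | zero =>
    simp only [Nat.testBit_zero]
    have e1 : (2*u) % 2 = 0 := by omega
    have e2 : (2 * (u &&& (u-1))) % 2 = 0 := by omega
    simp [e1, e2]
  | succ i =>
    simp only [Nat.testBit_add_one]
    rw [show (2*u)/2 = u from by omega, show (2*u-1)/2 = u-1 from by omega,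
        show (2 * (u &&& (u-1)))/2 = u &&& (u-1) from by omega, Nat.testBit_and]

theorem pvLog2Double (l : Nat) (h : 0 < l) : Nat.log2 (2*l) = Nat.log2 l + 1 := by
  rw [Nat.log2_eq_log_two, Nat.log2_eq_log_two, Nat.mul_comm,
      Nat.log_mul_base (by omega) (by omega)]

-- Int/Nat bridges (definitional)
theorem pvXorNat (a b : Nat) : ((a:Int)).xor ((b:Int)) = ((a ^^^ b : Nat) : Int) := rfl
theorem pvShiftNat (a : Nat) : ((a:Int)).shiftRight 1 = ((a >>> 1 : Nat) : Int) := rfl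
theorem pvLandOneNat (a : Nat) : ((a:Int)).land 1 = ((a &&& 1 : Nat) : Int) := rfl

theorem pvLandNeg (n : Nat) (h : 0 < n) :
    ((n:Int)).land (-(n:Int)) = ((Nat.ldiff n (n-1) : Nat) : Int) := by
  have hneg : -((n:Int)) = Int.negSucc (n-1) := by omega
  rw [hneg]; rfl

theorem pvBitLenPos (m : Nat) (h : 0 < m) :
    pyBitLength ((m:Int)) = ((Nat.log2 m : Nat) : Int) + 1 := by
  unfold pyBitLength
  rw [if_neg (by omega)]
  simp

-- one unfolded step of A's loop on a positive value, with the bit identities applied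
theorem pvAStep (f : Nat) (n : Nat) (h : 0 < n) :
    iterBitsLoopA (f+1) ((n:Int)) =
      ((Nat.log2 (Nat.ldiff n (n-1)) : Nat) : Int) :: iterBitsLoopA f ((n &&& (n-1) : Nat) : Int) := by
  show (if (n:Int) = 0 then []
        else (pyBitLength ((n:Int).land (-(n:Int))) - 1) ::
          iterBitsLoopA f ((n:Int).xor ((n:Int).land (-(n:Int))))) = _
  rw [if_neg (by omega), pvLandNeg n h, pvBitLenPos _ (pvLdiffPos n h), pvXorNat, pvXorLdiff]
  simp

-- doubling the argument shifts every emitted index by one (same fuel on both sides)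
theorem pvAEven (f : Nat) : ∀ u : Nat,
    iterBitsLoopA f ((2*u : Nat) : Int) = (iterBitsLoopA f ((u:Int))).map (· + 1) := by
  induction f with
  | zero => intro u; rfl
  | succ f ih =>
    intro u
    rcases Nat.eq_zero_or_pos u with h | h
    · subst h; rfl
    rw [pvAStep f (2*u) (by omega), pvAStep f u h,
        pvLdiffEven, pvAndEven,
        pvLog2Double _ (pvLdiffPos u h), List.map_cons, ih (u &&& (u-1))]
    simp

-- one unfolded step of B's loop, odd and even cases
theorem pvBStepOdd (f u : Nat) (p : Int) :
    iterBitsLoopB (f+1) ((2*u+1 : Nat) : Int) p = p :: iterBitsLoopB f ((u:Int)) (p+1) := by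
  show (if ((2*u+1 : Nat) : Int) = 0 then []
        else (if ((2*u+1 : Nat) : Int).land 1 ≠ 0 then [p] else []) ++
          iterBitsLoopB f (((2*u+1 : Nat) : Int).shiftRight 1) (p + 1)) = _
  rw [if_neg (by omega), pvLandOneNat, pvShiftNat,
      show (2*u+1) &&& 1 = 1 from by rw [Nat.and_one_is_mod]; omega,
      show (2*u+1) >>> 1 = u from by rw [Nat.shiftRight_one]; omega]
  simp

theorem pvBStepEven (f u : Nat) (p : Int) (h : 0 < u) :
    iterBitsLoopB (f+1) ((2*u : Nat) : Int) p = iterBitsLoopB f ((u:Int)) (p+1) := by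
  show (if ((2*u : Nat) : Int) = 0 then []
        else (if ((2*u : Nat) : Int).land 1 ≠ 0 then [p] else []) ++
          iterBitsLoopB f (((2*u : Nat) : Int).shiftRight 1) (p + 1)) = _
  rw [if_neg (by omega), pvLandOneNat, pvShiftNat,
      show (2*u) &&& 1 = 0 from by rw [Nat.and_one_is_mod]; omega,
      show (2*u) >>> 1 = u from by rw [Nat.shiftRight_one]; omega]
  simp

-- fuel irrelevance for A's loop (it stops as soon as temp reaches 0)
theorem pvAFuel : ∀ n : Nat, ∀ f : Nat, n < f →
    iterBitsLoopA (f+1) ((n:Int)) = iterBitsLoopA f ((n:Int)) := by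
  intro n
  induction n using Nat.strong_induction_on with
  | _ n ih =>
    intro f hf
    rcases Nat.eq_zero_or_pos n with h | h
    · subst h
      cases f with
      | zero => omega
      | succ f => rfl
    obtain ⟨f', rfl⟩ : ∃ f', f = f' + 1 := ⟨f - 1, by omega⟩
    rw [pvAStep (f'+1) n h, pvAStep f' n h,
        ih (n &&& (n-1)) (pvAndPredLt n h) f' (by have := pvAndPredLt n h; omega)]

-- main correspondence: B's shift-scan equals A's list with every index shifted by pos
theorem pvMain : ∀ n : Nat, ∀ f : Nat, ∀ p : Int, n < f →
    iterBitsLoopB f ((n:Int)) p = (iterBitsLoopA f ((n:Int))).map (· + p) := by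
  intro n
  induction n using Nat.strong_induction_on with
  | _ n ih =>
    intro f p hf
    obtain ⟨f', rfl⟩ : ∃ f', f = f' + 1 := ⟨f - 1, by omega⟩
    rcases Nat.eq_zero_or_pos n with h | h
    · subst h; rfl
    rcases Nat.even_or_odd n with ⟨u, hu⟩ | ⟨u, hu⟩
    · -- n = 2*u with u > 0
      have hn : n = 2*u := by omega
      have hu0 : 0 < u := by omega
      subst hn
      rw [pvBStepEven f' u p hu0, ih u (by omega) f' (p+1) (by omega),
          pvAEven (f'+1) u, pvAFuel u f' (by omega), List.map_map]
      apply List.map_congr_left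
      intro a _
      simp only [Function.comp_apply]
      omega
    · -- n = 2*u + 1
      have hn : n = 2*u+1 := by omega
      subst hn
      rw [pvBStepOdd f' u p, ih u (by omega) f' (p+1) (by omega),
          pvAStep f' (2*u+1) (by omega),
          show (2*u+1) - 1 = 2*u from by omega, pvLdiffOdd, pvAndOdd,
          show Nat.log2 1 = 0 from rfl, pvAEven f' u, List.map_cons, List.map_map]
      refine congrArg₂ List.cons (by simp) ?_
      apply List.map_congr_left
      intro a _
      simp only [Function.comp_apply]
      omega

-- ===== VERDICT (by name: the statement is the Claim_ definition above) =====
theorem iter_bits_spec : Claim_equal_iter_bits := by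
  intro mask _ hpre
  unfold Pre_iter_bits at hpre
  obtain ⟨n, rfl⟩ : ∃ n : Nat, mask = (n:Int) := ⟨mask.toNat, by omega⟩
  unfold Spec_iter_bits iter_bits iter_bits_alt
  rw [if_neg (by omega), if_neg (by omega), Int.toNat_natCast,
      pvMain n (n+1) 0 (by omega)]
  simp
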